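-- pv_equiv track=rewrite | github.com/mahmudhera/kRISP-meR_ | calculate_priors.py | determine_points
-- ===== SOURCE A (Python) =====
-- def determine_points(histo_data):
--     lower = higher = -1
--     for i in range(2,max(histo_data.keys())):
--         if histo_data[i-1] > histo_data[i] and histo_data[i+1] > histo_data[i]:
--             lower = i
--         if histo_data[i-1] < histo_data[i] and histo_data[i+1] < histo_data[i]:
--             higher = i
--             break
--     return lower, higher
-- ===== SOURCE B (Python) =====
-- def determine_points(histo_data):
--     m = max(histo_data.keys())
--     higher = -1
--     for i in range(2, m):
--         if histo_data[i-1] < histo_data[i] and histo_data[i+1] < histo_data[i]: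
--             higher = i
--             break
--     top = m if higher == -1 else higher
--     lower = -1
--     for i in range(top - 1, 1, -1):
--         if histo_data[i-1] > histo_data[i] and histo_data[i+1] > histo_data[i]:
--             lower = i
--             break
--     return lower, higher
-- ===== Notes on version B (the rewrite author's own statement) =====
-- stated objective: alternative
-- what changed: A's single forward scan that carries a running `lower` and breaks at the first local maximum is replaced by two independent break-out scans: a forward scan that only finds the first local maximum, then a backward scan from just below it (or from max(keys)-1 if none) that stops at the first local minimum met, which is exactly A's last-updated lower.
import Mathlib
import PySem

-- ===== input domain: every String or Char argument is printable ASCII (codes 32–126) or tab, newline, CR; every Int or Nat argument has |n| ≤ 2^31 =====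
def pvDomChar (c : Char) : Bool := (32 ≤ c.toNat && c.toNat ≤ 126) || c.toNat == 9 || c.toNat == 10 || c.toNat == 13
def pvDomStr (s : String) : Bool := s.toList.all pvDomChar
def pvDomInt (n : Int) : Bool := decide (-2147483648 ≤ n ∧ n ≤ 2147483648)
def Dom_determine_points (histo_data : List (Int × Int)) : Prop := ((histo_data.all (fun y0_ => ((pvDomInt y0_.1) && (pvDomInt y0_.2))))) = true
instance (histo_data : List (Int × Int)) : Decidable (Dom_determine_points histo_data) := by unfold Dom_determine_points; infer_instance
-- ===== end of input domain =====

-- B replaces A's single break-on-max scan carrying a `lower` accumulator by two independent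
-- break-out scans: forward for the first local maximum, then backward from it for the last
-- local minimum (objective: alternative decomposition; same cost).

-- ===== PORT A =====
-- A's single forward scan: records the latest local minimum in `lower`, breaks at the first local maximum.
def dpA_loop (d : PySem.Dict Int Int) : List Int → Int → Int × Int
  | [], lower => (lower, -1)
  | i :: rest, lower =>
    let lower' := if d.getD (i-1) 0 > d.getD i 0 ∧ d.getD (i+1) 0 > d.getD i 0 then i else lower
    if d.getD (i-1) 0 < d.getD i 0 ∧ d.getD (i+1) 0 < d.getD i 0 then (lower', i)
    else dpA_loop d rest lower'

def determine_points (histo_data : List (Int × Int)) : Int × Int :=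
  match PySem.List.max? (PySem.Dict.keys (PySem.Dict.mk histo_data)) (fun x => x) with
  | none => (-1, -1)   -- Python: max() of an empty dict raises ValueError; excluded by Pre_
  | some m => dpA_loop (PySem.Dict.mk histo_data) (PySem.List.pyRange 2 m 1) (-1)

-- ===== PORT B =====
-- forward scan: first local maximum, else -1
def dpB_high (d : PySem.Dict Int Int) : List Int → Int
  | [] => -1
  | i :: rest =>
    if d.getD (i-1) 0 < d.getD i 0 ∧ d.getD (i+1) 0 < d.getD i 0 then i
    else dpB_high d rest

-- backward scan: first local minimum met, else -1
def dpB_low (d : PySem.Dict Int Int) : List Int → Int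
  | [] => -1
  | i :: rest =>
    if d.getD (i-1) 0 > d.getD i 0 ∧ d.getD (i+1) 0 > d.getD i 0 then i
    else dpB_low d rest

def determine_points_alt (histo_data : List (Int × Int)) : Int × Int :=
  match PySem.List.max? (PySem.Dict.keys (PySem.Dict.mk histo_data)) (fun x => x) with
  | none => (-1, -1)   -- Python: max() of an empty dict raises ValueError; excluded by Pre_
  | some m =>
    let higher := dpB_high (PySem.Dict.mk histo_data) (PySem.List.pyRange 2 m 1)
    let top := if higher = -1 then m else higher
    (dpB_low (PySem.Dict.mk histo_data) (PySem.List.pyRange (top - 1) 1 (-1)), higher)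

-- ===== PRECONDITION & SPEC =====
-- iteration i of A's loop raises no KeyError: keys i-1 and i present, and (by `and` short-circuit)
-- key i+1 present unless histo_data[i-1] == histo_data[i]
def pvAccOK (d : PySem.Dict Int Int) (i : Int) : Bool :=
  d.contains (i-1) && d.contains i && (d.getD (i-1) 0 == d.getD i 0 || d.contains (i+1))

def pvIsMax (d : PySem.Dict Int Int) (i : Int) : Bool :=
  decide (d.getD (i-1) 0 < d.getD i 0) && decide (d.getD (i+1) 0 < d.getD i 0)

-- Pre_ excludes exactly the inputs where Python A raises: max() of an empty dict (ValueError), and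
-- the KeyError hit when the scan reaches an index whose accessed neighbour keys are missing before
-- any local maximum has broken the loop.
def Pre_determine_points (histo_data : List (Int × Int)) : Prop :=
  histo_data ≠ [] ∧
  ∀ i ∈ PySem.List.pyRange 2 ((PySem.List.max? (PySem.Dict.keys (PySem.Dict.mk histo_data)) (fun x => x)).getD 0) 1,
    pvAccOK (PySem.Dict.mk histo_data) i = true ∨
    ∃ j ∈ PySem.List.pyRange 2 i 1, pvIsMax (PySem.Dict.mk histo_data) j = true

instance (histo_data : List (Int × Int)) : Decidable (Pre_determine_points histo_data) := by
  unfold Pre_determine_points; infer_instance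

def pvWitness_determine_points : (List (Int × Int)) := [(1, 3), (2, 1), (3, 2)]

def Spec_determine_points (histo_data : List (Int × Int)) (out : Int × Int) : Prop := out = determine_points_alt histo_data
instance (histo_data : List (Int × Int)) (out : Int × Int) : Decidable (Spec_determine_points histo_data out) := by unfold Spec_determine_points; infer_instance

-- ===== CLAIM (what is proved, stated in full; the proofs are below) =====
def Claim_equal_determine_points : Prop := ∀ (histo_data : List (Int × Int)), Dom_determine_points histo_data → Pre_determine_points histo_data → Spec_determine_points histo_data (determine_points histo_data)

-- ===== LEMMAS AND PROOFS =====

-- proof-side generalisation of dpB_low with an explicit fallback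
def gLow (d : PySem.Dict Int Int) : List Int → Int → Int
  | [], l => l
  | i :: rest, l =>
    if d.getD (i-1) 0 > d.getD i 0 ∧ d.getD (i+1) 0 > d.getD i 0 then i
    else gLow d rest l

theorem dpB_low_eq_gLow (d : PySem.Dict Int Int) (xs : List Int) :
    dpB_low d xs = gLow d xs (-1) := by
  induction xs with
  | nil => rfl
  | cons i rest ih => simp only [dpB_low, gLow, ih]

theorem gLow_append (d : PySem.Dict Int Int) (xs : List Int) (i : Int) (l : Int) :
    gLow d (xs ++ [i]) l
      = gLow d xs (if d.getD (i-1) 0 > d.getD i 0 ∧ d.getD (i+1) 0 > d.getD i 0 then i else l) := by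
  induction xs with
  | nil => rfl
  | cons x rest ih => simp only [List.cons_append, gLow, ih]

theorem dpA_noMax (d : PySem.Dict Int Int) (xs : List Int) :
    ∀ l, (∀ i ∈ xs, ¬ (d.getD (i-1) 0 < d.getD i 0 ∧ d.getD (i+1) 0 < d.getD i 0)) →
    dpA_loop d xs l = (gLow d xs.reverse l, -1) := by
  induction xs with
  | nil => intro l _; rfl
  | cons i rest ih =>
    intro l h
    have hi := h i (List.mem_cons_self)
    simp only [dpA_loop, if_neg hi, List.reverse_cons]
    rw [ih _ (fun j hj => h j (List.mem_cons_of_mem _ hj)), gLow_append]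

theorem dpA_break (d : PySem.Dict Int Int) (pre : List Int) (i : Int) (post : List Int) :
    ∀ l, (∀ j ∈ pre, ¬ (d.getD (j-1) 0 < d.getD j 0 ∧ d.getD (j+1) 0 < d.getD j 0)) →
    (d.getD (i-1) 0 < d.getD i 0 ∧ d.getD (i+1) 0 < d.getD i 0) →
    dpA_loop d (pre ++ i :: post) l = (gLow d pre.reverse l, i) := by
  induction pre with
  | nil =>
    intro l _ hmax
    have hnm : ¬ (d.getD (i-1) 0 > d.getD i 0 ∧ d.getD (i+1) 0 > d.getD i 0) := by
      intro hmin; exact absurd hmax.1 (not_lt_of_gt hmin.1)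
    simp only [List.nil_append, dpA_loop, if_neg hnm, if_pos hmax, List.reverse_nil, gLow]
  | cons p pre' ih =>
    intro l h hmax
    have hp := h p (List.mem_cons_self)
    simp only [List.cons_append, dpA_loop, if_neg hp, List.reverse_cons]
    rw [ih _ (fun j hj => h j (List.mem_cons_of_mem _ hj)) hmax, gLow_append]

theorem dpB_high_noMax (d : PySem.Dict Int Int) (xs : List Int)
    (h : ∀ i ∈ xs, ¬ (d.getD (i-1) 0 < d.getD i 0 ∧ d.getD (i+1) 0 < d.getD i 0)) :
    dpB_high d xs = -1 := by
  induction xs with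
  | nil => rfl
  | cons i rest ih =>
    simp only [dpB_high, if_neg (h i (List.mem_cons_self))]
    exact ih (fun j hj => h j (List.mem_cons_of_mem _ hj))

theorem dpB_high_break (d : PySem.Dict Int Int) (pre : List Int) (i : Int) (post : List Int)
    (h : ∀ j ∈ pre, ¬ (d.getD (j-1) 0 < d.getD j 0 ∧ d.getD (j+1) 0 < d.getD j 0))
    (hmax : d.getD (i-1) 0 < d.getD i 0 ∧ d.getD (i+1) 0 < d.getD i 0) :
    dpB_high d (pre ++ i :: post) = i := by
  induction pre with
  | nil => simp only [List.nil_append, dpB_high, if_pos hmax]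
  | cons p pre' ih =>
    simp only [List.cons_append, dpB_high, if_neg (h p (List.mem_cons_self))]
    exact ih (fun j hj => h j (List.mem_cons_of_mem _ hj))

-- split any list at the first element satisfying P, or show there is none
theorem exists_first_split {α} (P : α → Prop) [DecidablePred P] (xs : List α) :
    (∀ i ∈ xs, ¬ P i) ∨
    ∃ pre i post, xs = pre ++ i :: post ∧ (∀ j ∈ pre, ¬ P j) ∧ P i := by
  induction xs with
  | nil => exact Or.inl (by simp)
  | cons x rest ih =>
    by_cases hx : P x
    · exact Or.inr ⟨[], x, rest, rfl, by simp, hx⟩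
    · rcases ih with hnone | ⟨pre, i, post, heq, hpre, hi⟩
      · refine Or.inl ?_
        intro j hj
        rcases List.mem_cons.mp hj with rfl | hj
        · exact hx
        · exact hnone j hj
      · refine Or.inr ⟨x :: pre, i, post, by rw [heq]; rfl, ?_, hi⟩
        intro j hj
        rcases List.mem_cons.mp hj with rfl | hj
        · exact hx
        · exact hpre j hj

theorem split_unique {α} {a : α} : ∀ {l₁ l₂ t₁ t₂ : List α},
    l₁ ++ a :: t₁ = l₂ ++ a :: t₂ → a ∉ l₁ → a ∉ l₂ → l₁ = l₂ := by
  intro l₁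
  induction l₁ with
  | nil =>
    intro l₂ t₁ t₂ h h₁ h₂
    cases l₂ with
    | nil => rfl
    | cons y l₂' =>
      exfalso
      have : a = y := by simpa using congrArg (fun l => l.head?) h
      exact h₂ (this ▸ List.mem_cons_self)
  | cons x l₁' ih =>
    intro l₂ t₁ t₂ h h₁ h₂
    cases l₂ with
    | nil =>
      exfalso
      have : x = a := by simpa using congrArg (fun l => l.head?) h
      exact h₁ (this ▸ List.mem_cons_self)
    | cons y l₂' =>
      have hxy : x = y := by simpa using congrArg (fun l => l.head?) h
      have htl : l₁' ++ a :: t₁ = l₂' ++ a :: t₂ := by simpa using congrArg List.tail h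
      have := ih htl (fun hm => h₁ (List.mem_cons_of_mem _ hm)) (fun hm => h₂ (List.mem_cons_of_mem _ hm))
      rw [hxy, this]

-- the countdown range is the reverse of the forward range
theorem countdown_reverse (a : Int) : PySem.List.pyRange (a - 1) 1 (-1) = (PySem.List.pyRange 2 a 1).reverse := by
  have h := PySem.List.pyRange_neg_one_eq_reverse (a - 1) 1
  simpa using h

-- the two ports agree on every input (even those Pre_ excludes: missing keys read as default 0)
theorem ports_agree (histo_data : List (Int × Int)) :
    determine_points histo_data = determine_points_alt histo_data := by
  unfold determine_points determine_points_alt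
  cases hm : PySem.List.max? (PySem.Dict.keys (PySem.Dict.mk histo_data)) (fun x => x) with
  | none => rfl
  | some m =>
    simp only []
    set d := PySem.Dict.mk histo_data with hd
    rcases exists_first_split
        (fun i => d.getD (i-1) 0 < d.getD i 0 ∧ d.getD (i+1) 0 < d.getD i 0)
        (PySem.List.pyRange 2 m 1) with hnone | ⟨pre, i, post, heq, hpre, hi⟩
    · rw [dpA_noMax d _ _ hnone, dpB_high_noMax d _ hnone, dpB_low_eq_gLow, countdown_reverse]
      norm_num
    · have himem : i ∈ PySem.List.pyRange 2 m 1 := heq ▸ List.mem_append_right _ (List.mem_cons_self)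
      have hib : 2 ≤ i ∧ i < m := (PySem.List.mem_pyRange_one).mp himem
      have hne : i ≠ -1 := by omega
      rw [heq, dpA_break d pre i post _ hpre hi, dpB_high_break d pre i post hpre hi]
      simp only [if_neg hne]
      -- identify pre with pyRange 2 i 1
      have hsplit : PySem.List.pyRange 2 m 1 = PySem.List.pyRange 2 i 1 ++ PySem.List.pyRange i m 1 :=
        PySem.List.pyRange_one_append 2 i m (by omega) (by omega)
      have hcons : PySem.List.pyRange i m 1 = i :: PySem.List.pyRange (i+1) m 1 :=
        PySem.List.pyRange_one_cons (by omega)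
      have heq2 : pre ++ i :: post = PySem.List.pyRange 2 i 1 ++ i :: PySem.List.pyRange (i+1) m 1 := by
        rw [← heq, hsplit, hcons]
      have hnotin1 : i ∉ pre := fun hm' => hpre i hm' hi
      have hnotin2 : i ∉ PySem.List.pyRange 2 i 1 := by
        intro hm'
        have := (PySem.List.mem_pyRange_one).mp hm'
        omega
      have hpreeq : pre = PySem.List.pyRange 2 i 1 := split_unique heq2 hnotin1 hnotin2
      rw [dpB_low_eq_gLow, countdown_reverse, ← hpreeq]

-- ===== VERDICT (by name: the statement is the Claim_ definition above) =====
theorem determine_points_spec : Claim_equal_determine_points := by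
  intro histo_data _ _
  unfold Spec_determine_points
  exact ports_agree histo_data
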